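-- pv_equiv track=rewrite | github.com/comeheredart/algorithm_python | bruteForce/홀수홀릭호석.py | cntOdd
-- ===== SOURCE A (Python) =====
-- def cntOdd(n):
--     cnt = 0
--     odds = ['1','3','5','7','9']
--     s = str(n)
--     for i in s:
--         if i in odds:
--             cnt += 1
--     return cnt
-- ===== SOURCE B (Python) =====
-- def cntOdd(n):
--     freq = {}
--     for c in str(n):
--         freq[c] = freq.get(c, 0) + 1
--     return sum(freq.get(d, 0) for d in '13579')
-- ===== Notes on version B (the rewrite author's own statement) =====
-- stated objective: alternative
-- what changed: B builds a character frequency table of str(n) in one pass and then sums the counts of the five odd digit keys, instead of A's single guarded scan with a membership test per character.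
import Mathlib
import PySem

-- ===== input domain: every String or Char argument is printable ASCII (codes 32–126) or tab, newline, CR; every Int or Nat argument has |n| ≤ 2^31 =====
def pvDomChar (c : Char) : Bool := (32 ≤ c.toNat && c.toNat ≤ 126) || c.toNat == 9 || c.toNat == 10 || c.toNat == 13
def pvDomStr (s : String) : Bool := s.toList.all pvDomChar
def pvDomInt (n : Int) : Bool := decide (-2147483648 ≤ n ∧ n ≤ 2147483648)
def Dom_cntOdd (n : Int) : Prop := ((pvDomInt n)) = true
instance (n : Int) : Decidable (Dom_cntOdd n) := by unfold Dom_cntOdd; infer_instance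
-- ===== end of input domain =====

-- B builds a frequency table of str(n)'s characters first and sums the five odd-digit keys;
-- same cost as A, a different (table-then-sum) shape.

-- ===== PORT A =====
def cntOdd (n : Int) : Int :=
  let cnt : Int := 0
  let odds : List Char := ['1', '3', '5', '7', '9']
  let s := PySem.Int.toStr n
  s.toList.foldl (fun cnt i => if odds.contains i then cnt + 1 else cnt) cnt

-- ===== PORT B =====
def cntOdd_alt (n : Int) : Int :=
  let freq : PySem.Dict Char Int :=
    (PySem.Int.toStr n).toList.foldl (fun d c => d.insert c (d.getD c 0 + 1)) PySem.Dict.empty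
  ((['1', '3', '5', '7', '9'] : List Char).map (fun d => freq.getD d 0)).sum

-- ===== PRECONDITION & SPEC =====
def Spec_cntOdd (n : Int) (out : Int) : Prop := out = cntOdd_alt n
instance (n : Int) (out : Int) : Decidable (Spec_cntOdd n out) := by unfold Spec_cntOdd; infer_instance

-- ===== CLAIM (what is proved, stated in full; the proofs are below) =====
def Claim_equal_cntOdd : Prop := ∀ (n : Int), Dom_cntOdd n → Spec_cntOdd n (cntOdd n)

-- ===== LEMMAS AND PROOFS =====

lemma countP_odds_eq_sum_counts (l : List Char) :
    (l.countP (fun i => (['1','3','5','7','9'] : List Char).contains i) : Int) =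
      (l.count '1' : Int) + l.count '3' + l.count '5' + l.count '7' + l.count '9' := by
  induction l with
  | nil => simp
  | cons h t ih =>
    simp only [List.countP_cons, List.count_cons]
    by_cases h1 : h = '1' <;> by_cases h3 : h = '3' <;> by_cases h5 : h = '5' <;>
      by_cases h7 : h = '7' <;> by_cases h9 : h = '9' <;>
      simp_all <;> omega

-- ===== VERDICT (by name: the statement is the Claim_ definition above) =====
theorem cntOdd_spec : Claim_equal_cntOdd := by
  intro n _
  show cntOdd n = cntOdd_alt n
  unfold cntOdd cntOdd_alt
  simp only [PySem.List.foldl_if_add_one, PySem.Dict.getD_foldl_insert_add_one,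
    PySem.Dict.getD_empty, List.map_cons, List.map_nil, List.sum_cons, List.sum_nil]
  rw [countP_odds_eq_sum_counts]
  ring
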